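-- pv_equiv track=rewrite | github.com/IshanTaldekar/Anytime-weighted-A-star | Maze Solver/Visualization.py | process_map
-- ===== SOURCE A (Python) =====
-- def process_map(map):
--     x_dim = len(map)
--     y_dim = len(map[0])
--     free_x = []
--     free_y = []
--     occupied_x = []
--     occupied_y = []
--     for map_x in range(x_dim):
--         for map_y in range(y_dim):
--             if(map[map_x][map_y]==' '):
--                 free_x.append(map_x)
--                 free_y.append(map_y)
--                 continue
--             if(map[map_x][map_y]=='#'):
--                 occupied_x.append(map_x)
--                 occupied_y.append(map_y)
--     return free_x, free_y, occupied_x, occupied_y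
-- ===== SOURCE B (Python) =====
-- def locate(map, target):
--     y_dim = len(map[0])
--     xs, ys = [], []
--     for x, row in enumerate(map):
--         cols = [y for y in range(y_dim) if row[y] == target]
--         xs += [x] * len(cols)
--         ys += cols
--     return xs, ys
--
--
-- def process_map(map):
--     free_x, free_y = locate(map, ' ')
--     occupied_x, occupied_y = locate(map, '#')
--     return free_x, free_y, occupied_x, occupied_y
-- ===== Notes on version B (the rewrite author's own statement) =====
-- stated objective: alternative
-- what changed: B replaces A's single nested scan that classifies each cell into four parallel accumulator lists with two staged passes of a helper locate(map, target): per row it filters the matching column indices and derives the x-list by replication [x]*count, so the x coordinate is never appended per cell and the four-way branch disappears.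
import Mathlib
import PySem

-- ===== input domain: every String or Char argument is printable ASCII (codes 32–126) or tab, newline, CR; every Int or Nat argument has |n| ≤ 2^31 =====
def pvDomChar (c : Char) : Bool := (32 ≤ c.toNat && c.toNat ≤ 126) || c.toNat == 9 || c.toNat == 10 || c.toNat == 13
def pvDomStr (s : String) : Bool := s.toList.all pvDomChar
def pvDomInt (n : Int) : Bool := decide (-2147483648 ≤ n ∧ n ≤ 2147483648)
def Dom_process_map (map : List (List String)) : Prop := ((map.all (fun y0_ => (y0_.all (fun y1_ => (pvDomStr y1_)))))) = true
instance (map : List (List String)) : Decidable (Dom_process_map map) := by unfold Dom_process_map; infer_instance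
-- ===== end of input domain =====

-- B replaces A's single nested scan into four parallel lists by two staged passes of a helper
-- locate(map, target): per row it filters matching column indices and gets the x-list by
-- replication [x]*count; alternative decomposition, same cost.

-- ===== PORT A =====
def process_map (map : List (List String)) : List Int × List Int × List Int × List Int :=
  let x_dim : Int := (map.length : Int)
  let y_dim : Int := ((PySem.List.pyGetD map 0 []).length : Int)
  (PySem.List.pyRange 0 x_dim 1).foldl (fun s mx =>
    (PySem.List.pyRange 0 y_dim 1).foldl (fun s my =>
      if PySem.List.pyGetD (PySem.List.pyGetD map mx []) my "" == " " then
        (s.1 ++ [mx], s.2.1 ++ [my], s.2.2.1, s.2.2.2)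
      else if PySem.List.pyGetD (PySem.List.pyGetD map mx []) my "" == "#" then
        (s.1, s.2.1, s.2.2.1 ++ [mx], s.2.2.2 ++ [my])
      else s) s)
    (([] : List Int), ([] : List Int), ([] : List Int), ([] : List Int))

-- ===== PORT B =====
def pvLocate (map : List (List String)) (target : String) : List Int × List Int :=
  let y_dim : Int := ((PySem.List.pyGetD map 0 []).length : Int)
  (PySem.List.enumerate map 0).foldl (fun s p =>
    let cols := (PySem.List.pyRange 0 y_dim 1).filter
      (fun y => PySem.List.pyGetD p.2 y "" == target)
    (s.1 ++ List.replicate cols.length p.1, s.2 ++ cols))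
    (([] : List Int), ([] : List Int))

def process_map_alt (map : List (List String)) : List Int × List Int × List Int × List Int :=
  let free := pvLocate map " "
  let occupied := pvLocate map "#"
  (free.1, free.2, occupied.1, occupied.2)

-- ===== PRECONDITION & SPEC =====
-- Pre_ excludes exactly the inputs on which the Python A raises IndexError: the empty grid
-- (map[0]) and grids with some row shorter than the first row (map[x][y] out of range).
def Pre_process_map (map : List (List String)) : Prop :=
  map ≠ [] ∧ ∀ row ∈ map, (map.headD []).length ≤ row.length
instance (map : List (List String)) : Decidable (Pre_process_map map) := by unfold Pre_process_map; infer_instance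
def pvWitness_process_map : List (List String) := [[" ", "#"], ["#", " "]]

def Spec_process_map (map : List (List String)) (out : List Int × List Int × List Int × List Int) : Prop := out = process_map_alt map
instance (map : List (List String)) (out : List Int × List Int × List Int × List Int) : Decidable (Spec_process_map map out) := by unfold Spec_process_map; infer_instance

-- ===== CLAIM (what is proved, stated in full; the proofs are below) =====
def Claim_equal_process_map : Prop := ∀ (map : List (List String)), Dom_process_map map → Pre_process_map map → Spec_process_map map (process_map map)

-- ===== LEMMAS AND PROOFS =====

-- A's inner loop: appending to four parallel accumulators = filters of the scanned range.
theorem pv_inner (c : Int → String) (mx : Int) (ys : List Int)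
    (s : List Int × List Int × List Int × List Int) :
    ys.foldl (fun s my =>
      if c my == " " then (s.1 ++ [mx], s.2.1 ++ [my], s.2.2.1, s.2.2.2)
      else if c my == "#" then (s.1, s.2.1, s.2.2.1 ++ [mx], s.2.2.2 ++ [my])
      else s) s
    = (s.1 ++ ((ys.filter (fun my => c my == " ")).map (fun _ => mx)),
       s.2.1 ++ ys.filter (fun my => c my == " "),
       s.2.2.1 ++ ((ys.filter (fun my => c my == "#")).map (fun _ => mx)),
       s.2.2.2 ++ ys.filter (fun my => c my == "#")) := by
  induction ys generalizing s with
  | nil => simp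
  | cons y ys ih =>
    rw [List.foldl_cons, ih]
    by_cases h1 : c y == " "
    · have h2 : (c y == "#") = false := by
        simp only [beq_iff_eq] at h1 ⊢; simp [h1]
      simp [h1, h2]
    · by_cases h2 : c y == "#"
      · simp [h1, h2]
      · simp [h1, h2]

-- A's outer loop: four append-accumulators = four flatMaps.
theorem pv_outer (g1 g2 g3 g4 : Int → List Int) (xs : List Int)
    (s : List Int × List Int × List Int × List Int) :
    xs.foldl (fun s mx => (s.1 ++ g1 mx, s.2.1 ++ g2 mx, s.2.2.1 ++ g3 mx, s.2.2.2 ++ g4 mx)) s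
    = (s.1 ++ xs.flatMap g1, s.2.1 ++ xs.flatMap g2,
       s.2.2.1 ++ xs.flatMap g3, s.2.2.2 ++ xs.flatMap g4) := by
  induction xs generalizing s with
  | nil => simp
  | cons x xs ih => simp [ih]

-- B's loop in locate: a pair of append-accumulators = a pair of flatMaps.
theorem pv_pair (g1 g2 : Int → List Int) (xs : List Int) (s : List Int × List Int) :
    xs.foldl (fun s mx => (s.1 ++ g1 mx, s.2 ++ g2 mx)) s
    = (s.1 ++ xs.flatMap g1, s.2 ++ xs.flatMap g2) := by
  induction xs generalizing s with
  | nil => simp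
  | cons x xs ih => simp [ih]

theorem pv_locate_eq (map : List (List String)) (t : String) :
    pvLocate map t
    = ((PySem.List.pyRange 0 (map.length : Int) 1).flatMap (fun mx =>
         ((PySem.List.pyRange 0 ((PySem.List.pyGetD map 0 []).length : Int) 1).filter
            (fun my => PySem.List.pyGetD (PySem.List.pyGetD map mx []) my "" == t)).map (fun _ => mx)),
       (PySem.List.pyRange 0 (map.length : Int) 1).flatMap (fun mx =>
         (PySem.List.pyRange 0 ((PySem.List.pyGetD map 0 []).length : Int) 1).filter
            (fun my => PySem.List.pyGetD (PySem.List.pyGetD map mx []) my "" == t))) := by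
  simp only [pvLocate]
  rw [PySem.List.enumerate_eq_map_pyRange map ([] : List String), List.foldl_map]
  simp only [pv_pair, List.nil_append, PySem.List.len_eq]
  simp [List.map_const']

theorem pv_ports_eq (map : List (List String)) : process_map map = process_map_alt map := by
  simp only [process_map, process_map_alt, pv_locate_eq]
  simp only [pv_inner, pv_outer, List.nil_append]

-- ===== VERDICT (by name: the statement is the Claim_ definition above) =====
theorem process_map_spec : Claim_equal_process_map := by
  intro map _ _
  exact (pv_ports_eq map).symm ▸ rfl
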